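-- pv_equiv track=rewrite | github.com/thisismygitrepo/machineconfig | src/machineconfig/scripts/python/helpers/helpers_devops/cli_backup_retrieve.py | _upsert_backup_entry
-- ===== SOURCE A (Python) =====
-- def _upsert_backup_entry(content: str, group_name: str, entry_name: str, entry_line: str) -> tuple[str, bool]:
--     header = f"[{group_name}]"
--     lines = content.splitlines()
--     new_lines: list[str] = []
--     in_target = False
--     entry_written = False
--     replaced = False
--     for line in lines:
--         stripped = line.strip()
--         if stripped.startswith("[") and stripped.endswith("]"):
--             if in_target and not entry_written:
--                 new_lines.append(entry_line)
--                 entry_written = True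
--             in_target = False
--             if stripped == header:
--                 in_target = True
--             new_lines.append(line)
--             continue
--         if in_target:
--             if stripped.startswith(f"{entry_name} ="):
--                 new_lines.append(entry_line)
--                 replaced = True
--                 entry_written = True
--                 continue
--         new_lines.append(line)
--     if not entry_written:
--         if header not in content:
--             if new_lines and new_lines[-1].strip():
--                 new_lines.append("")
--             new_lines.append(header)
--         new_lines.append(entry_line)
--     updated = "\n".join(new_lines).rstrip() + "\n"
--     return updated, replaced
-- ===== SOURCE B (Python) =====
-- def _upsert_backup_entry(content: str, group_name: str, entry_name: str, entry_line: str) -> tuple[str, bool]: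
--     header = f"[{group_name}]"
--     prefix = f"{entry_name} ="
--     # Phase 1: group the lines into sections: a preamble (header None) plus one
--     # group per '[...]' header line, each carrying the body lines that follow it.
--     groups: list[tuple[str | None, list[str]]] = []
--     cur_header: str | None = None
--     cur_body: list[str] = []
--     for line in content.splitlines():
--         s = line.strip()
--         if s.startswith("[") and s.endswith("]"):
--             groups.append((cur_header, cur_body))
--             cur_header, cur_body = line, []
--         else:
--             cur_body.append(line)
--     groups.append((cur_header, cur_body))
--     # Phase 2: emit the groups, upserting inside every target section.
--     replaced = False
--     written = False
--     out_lines: list[str] = []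
--     last = len(groups) - 1
--     for i, (h, body) in enumerate(groups):
--         if h is not None:
--             out_lines.append(h)
--         if h is not None and h.strip() == header:
--             for line in body:
--                 if line.strip().startswith(prefix):
--                     out_lines.append(entry_line)
--                     replaced = True
--                     written = True
--                 else:
--                     out_lines.append(line)
--             if not written and i < last:
--                 out_lines.append(entry_line)
--                 written = True
--         else:
--             out_lines.extend(body)
--     if not written:
--         if header not in content:
--             if out_lines and out_lines[-1].strip():
--                 out_lines.append("")
--             out_lines.append(header)
--         out_lines.append(entry_line)
--     return "\n".join(out_lines).rstrip() + "\n", replaced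
-- ===== Notes on version B (the rewrite author's own statement) =====
-- stated objective: alternative
-- what changed: Replaces A's single pass driven by in_target/entry_written flags with a two-phase decomposition: first parse the lines into an ordered list of sections (preamble + one group per '[...]' header with its body), then emit the groups, replacing or appending the entry inside each target section.
import Mathlib
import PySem

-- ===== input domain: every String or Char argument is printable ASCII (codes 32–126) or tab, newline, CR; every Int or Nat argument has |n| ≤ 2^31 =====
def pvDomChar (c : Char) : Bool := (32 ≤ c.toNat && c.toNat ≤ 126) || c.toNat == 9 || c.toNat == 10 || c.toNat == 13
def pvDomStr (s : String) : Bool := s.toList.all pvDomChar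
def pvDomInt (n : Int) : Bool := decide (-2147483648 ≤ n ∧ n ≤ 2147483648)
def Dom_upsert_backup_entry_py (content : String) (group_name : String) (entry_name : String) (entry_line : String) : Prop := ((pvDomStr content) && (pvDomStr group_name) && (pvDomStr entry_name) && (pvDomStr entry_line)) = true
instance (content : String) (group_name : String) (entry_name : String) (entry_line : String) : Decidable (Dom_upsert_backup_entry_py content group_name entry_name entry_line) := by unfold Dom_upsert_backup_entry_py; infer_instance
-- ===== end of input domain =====

-- B re-decomposes A's single-pass flag machine into two phases (group the lines
-- into sections, then emit with the upsert done per section); return values proved equal.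

-- ===== PORT A =====
-- A's loop step over state (new_lines, in_target, entry_written, replaced)
def pvStepA (header pfx entry_line : String)
    (s : List String × Bool × Bool × Bool) (line : String) :
    List String × Bool × Bool × Bool :=
  match s with
  | (nl, inT, ew, rp) =>
    let stripped := PySem.Str.strip line
    if PySem.Str.startswith stripped "[" && PySem.Str.endswith stripped "]" then
      let nl := if inT && !ew then nl ++ [entry_line] else nl
      let ew := if inT && !ew then true else ew
      (nl ++ [line], stripped == header, ew, rp)
    else if inT && PySem.Str.startswith stripped pfx then
      (nl ++ [entry_line], inT, true, true)
    else
      (nl ++ [line], inT, ew, rp)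

-- the code after the loop — BOTH Pythons end with these identical lines, so A's and B's ports share this helper
def pvFinishA (content header entry_line : String)
    (nl : List String) (ew rp : Bool) : String × Bool :=
  let nl :=
    if !ew then
      let nl :=
        if !(PySem.Str.isIn header content) then
          let nl :=
            if (match nl.getLast? with
                | some l => PySem.Str.strip l != ""
                | none => false) then nl ++ [""] else nl
          nl ++ [header]
        else nl
      nl ++ [entry_line]
    else nl
  (PySem.Str.rstrip (PySem.Str.join "\n" nl) ++ "\n", rp)

def upsert_backup_entry_py (content : String) (group_name : String) (entry_name : String) (entry_line : String) : String × Bool :=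
  match List.foldl (pvStepA ("[" ++ group_name ++ "]") (entry_name ++ " =") entry_line)
      ([], false, false, false) (PySem.Str.splitlines content) with
  | (nl, _inT, ew, rp) => pvFinishA content ("[" ++ group_name ++ "]") entry_line nl ew rp

-- ===== PORT B =====
-- Phase 1: split the lines into groups: a preamble (header `none`), then one
-- group per '[...]' header line carrying the body lines that follow it
def pvBuildGroups (lines : List String) (curH : Option String) (curB : List String) :
    List (Option String × List String) :=
  match lines with
  | [] => [(curH, curB)]
  | l :: rest =>
    let s := PySem.Str.strip l
    if PySem.Str.startswith s "[" && PySem.Str.endswith s "]" then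
      (curH, curB) :: pvBuildGroups rest (some l) []
    else
      pvBuildGroups rest curH (curB ++ [l])

-- Phase 2: emit a target section's body, replacing matching entry lines
def pvEmitBody (pfx entry_line : String) (body : List String)
    (st : List String × Bool × Bool) : List String × Bool × Bool :=
  body.foldl (fun s line =>
    if PySem.Str.startswith (PySem.Str.strip line) pfx then
      (s.1 ++ [entry_line], true, true)
    else (s.1 ++ [line], s.2.1, s.2.2)) st

def pvEmitGroup (header pfx entry_line : String) (g : Option String × List String)
    (notLast : Bool) (acc : List String) (w r : Bool) : List String × Bool × Bool :=
  match g.1 with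
  | none => (acc ++ g.2, w, r)
  | some h =>
    if PySem.Str.strip h == header then
      match pvEmitBody pfx entry_line g.2 (acc ++ [h], w, r) with
      | (acc, w, r) => if !w && notLast then (acc ++ [entry_line], true, r) else (acc, w, r)
    else (acc ++ [h] ++ g.2, w, r)

def pvEmitAll (header pfx entry_line : String) (gs : List (Option String × List String))
    (acc : List String) (w r : Bool) : List String × Bool × Bool :=
  match gs with
  | [] => (acc, w, r)
  | g :: rest =>
    match pvEmitGroup header pfx entry_line g (!rest.isEmpty) acc w r with
    | (acc, w, r) => pvEmitAll header pfx entry_line rest acc w r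

def upsert_backup_entry_py_alt (content : String) (group_name : String) (entry_name : String) (entry_line : String) : String × Bool :=
  match pvEmitAll ("[" ++ group_name ++ "]") (entry_name ++ " =") entry_line
      (pvBuildGroups (PySem.Str.splitlines content) none []) [] false false with
  | (nl, w, r) => pvFinishA content ("[" ++ group_name ++ "]") entry_line nl w r

-- ===== PRECONDITION & SPEC =====
def Spec_upsert_backup_entry_py (content : String) (group_name : String) (entry_name : String) (entry_line : String) (out : String × Bool) : Prop := out = upsert_backup_entry_py_alt content group_name entry_name entry_line
instance (content : String) (group_name : String) (entry_name : String) (entry_line : String) (out : String × Bool) : Decidable (Spec_upsert_backup_entry_py content group_name entry_name entry_line out) := by unfold Spec_upsert_backup_entry_py; infer_instance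

-- ===== CLAIM (what is proved, stated in full; the proofs are below) =====
def Claim_equal_upsert_backup_entry_py : Prop := ∀ (content : String) (group_name : String) (entry_name : String) (entry_line : String), Dom_upsert_backup_entry_py content group_name entry_name entry_line → Spec_upsert_backup_entry_py content group_name entry_name entry_line (upsert_backup_entry_py content group_name entry_name entry_line)

-- ===== LEMMAS AND PROOFS =====

-- abbreviations used only by the proofs
def pvTgt (header : String) (curH : Option String) : Bool :=
  match curH with | none => false | some h => PySem.Str.strip h == header

def pvHdrOut (curH : Option String) : List String :=
  match curH with | none => [] | some h => [h]

def pvHit (pfx : String) (b : List String) : Bool :=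
  b.any (fun l => PySem.Str.startswith (PySem.Str.strip l) pfx)

def pvBodyOut (pfx entry_line : String) (t : Bool) (b : List String) : List String :=
  if t then b.map (fun l => if PySem.Str.startswith (PySem.Str.strip l) pfx then entry_line else l)
  else b

lemma pvEmitBody_eq (pfx el : String) (b : List String) (acc : List String) (w r : Bool) :
    pvEmitBody pfx el b (acc, w, r)
      = (acc ++ pvBodyOut pfx el true b, w || pvHit pfx b, r || pvHit pfx b) := by
  induction b generalizing acc w r with
  | nil => simp [pvEmitBody, pvBodyOut, pvHit]
  | cons l rest ih =>
    by_cases hm : PySem.Chars.startswith (PySem.Chars.strip l.toList) pfx.toList = true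
    · rw [show pvEmitBody pfx el (l :: rest) (acc, w, r)
            = pvEmitBody pfx el rest (acc ++ [el], true, true) by
          simp [pvEmitBody, hm]]
      rw [ih]
      simp [pvBodyOut, pvHit, hm]
    · rw [show pvEmitBody pfx el (l :: rest) (acc, w, r)
            = pvEmitBody pfx el rest (acc ++ [l], w, r) by
          simp [pvEmitBody, hm]]
      rw [ih]
      simp [pvBodyOut, pvHit, hm]

lemma pvBuildGroups_ne_nil (lines : List String) (curH : Option String) (curB : List String) :
    (pvBuildGroups lines curH curB).isEmpty = false := by
  induction lines generalizing curH curB with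
  | nil => simp [pvBuildGroups]
  | cons l rest ih =>
    simp only [pvBuildGroups]
    split
    · simp
    · exact ih curH (curB ++ [l])

lemma pvEmitGroup_last (header pfx el : String) (curH : Option String)
    (curB acc : List String) (w r : Bool) :
    pvEmitGroup header pfx el (curH, curB) false acc w r
      = (acc ++ pvHdrOut curH ++ pvBodyOut pfx el (pvTgt header curH) curB,
         w || (pvTgt header curH && pvHit pfx curB),
         r || (pvTgt header curH && pvHit pfx curB)) := by
  match curH with
  | none => simp [pvEmitGroup, pvTgt, pvHdrOut, pvBodyOut]
  | some h =>
    by_cases ht : (PySem.Str.strip h == header) = true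
    · simp [pvEmitGroup, pvTgt, pvHdrOut, ht, pvEmitBody_eq]
    · simp [pvEmitGroup, pvTgt, pvHdrOut, pvBodyOut, ht]

lemma pvEmitGroup_notLast (header pfx el : String) (curH : Option String)
    (curB acc : List String) (w r : Bool) :
    pvEmitGroup header pfx el (curH, curB) true acc w r
      = (acc ++ pvHdrOut curH ++ pvBodyOut pfx el (pvTgt header curH) curB
           ++ (if pvTgt header curH && !(w || pvHit pfx curB) then [el] else []),
         w || pvTgt header curH,
         r || (pvTgt header curH && pvHit pfx curB)) := by
  match curH with
  | none => simp [pvEmitGroup, pvTgt, pvHdrOut, pvBodyOut]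
  | some h =>
    by_cases ht : (PySem.Str.strip h == header) = true
    · simp only [pvEmitGroup, ht, if_true, pvEmitBody_eq]
      cases hw : w <;> cases hh : pvHit pfx curB <;>
        simp [pvTgt, pvHdrOut, ht, List.append_assoc]
    · simp [pvEmitGroup, pvTgt, pvHdrOut, pvBodyOut, ht]

lemma pvStepA_header (header pfx el l : String) (X : List String) (t ew rp : Bool)
    (hl : (PySem.Chars.startswith (PySem.Chars.strip l.toList) ['['] && PySem.Chars.endswith (PySem.Chars.strip l.toList) [']']) = true) :
    pvStepA header pfx el (X, t, ew, rp) l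
      = (X ++ (if t && !ew then [el] else []) ++ [l], PySem.Str.strip l == header, ew || t, rp) := by
  cases t <;> cases ew <;> simp [pvStepA, hl]

lemma pvMain (header pfx el : String) (lines : List String) :
    ∀ (curH : Option String) (curB acc : List String) (w r : Bool),
    pvEmitAll header pfx el (pvBuildGroups lines curH curB) acc w r
      = (match List.foldl (pvStepA header pfx el)
            (acc ++ pvHdrOut curH ++ pvBodyOut pfx el (pvTgt header curH) curB,
             pvTgt header curH,
             w || (pvTgt header curH && pvHit pfx curB),
             r || (pvTgt header curH && pvHit pfx curB)) lines with
         | (nl, _inT, ew, rp) => (nl, ew, rp)) := by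
  induction lines with
  | nil =>
    intro curH curB acc w r
    rw [show pvBuildGroups [] curH curB = [(curH, curB)] from rfl]
    rw [show pvEmitAll header pfx el [(curH, curB)] acc w r
          = pvEmitGroup header pfx el (curH, curB) false acc w r by
        simp [pvEmitAll]]
    rw [pvEmitGroup_last]
    rfl
  | cons l rest ih =>
    intro curH curB acc w r
    rw [List.foldl_cons]
    by_cases hl : (PySem.Chars.startswith (PySem.Chars.strip l.toList) ['['] && PySem.Chars.endswith (PySem.Chars.strip l.toList) [']']) = true
    · -- l is a header line
      rw [show pvBuildGroups (l :: rest) curH curB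
            = (curH, curB) :: pvBuildGroups rest (some l) [] by
          simp [pvBuildGroups, hl]]
      have hcons : pvEmitAll header pfx el ((curH, curB) :: pvBuildGroups rest (some l) []) acc w r
          = pvEmitAll header pfx el (pvBuildGroups rest (some l) [])
              (acc ++ pvHdrOut curH ++ pvBodyOut pfx el (pvTgt header curH) curB
                ++ (if pvTgt header curH && !(w || pvHit pfx curB) then [el] else []))
              (w || pvTgt header curH)
              (r || (pvTgt header curH && pvHit pfx curB)) := by
        simp only [pvEmitAll]
        rw [show (!(pvBuildGroups rest (some l) []).isEmpty) = true by
              simp [pvBuildGroups_ne_nil]]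
        rw [pvEmitGroup_notLast]
      rw [hcons, ih (some l) [] _ _ _]
      have e1 : (pvTgt header curH && !(w || (pvTgt header curH && pvHit pfx curB)))
          = (pvTgt header curH && !(w || pvHit pfx curB)) := by
        cases pvTgt header curH <;> cases w <;> cases pvHit pfx curB <;> rfl
      have e2 : ((w || (pvTgt header curH && pvHit pfx curB)) || pvTgt header curH)
          = (w || pvTgt header curH) := by
        cases pvTgt header curH <;> cases w <;> cases pvHit pfx curB <;> rfl
      have hstate :
          ((acc ++ pvHdrOut curH ++ pvBodyOut pfx el (pvTgt header curH) curB)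
              ++ (if pvTgt header curH && !(w || (pvTgt header curH && pvHit pfx curB)) then [el] else []) ++ [l],
           PySem.Str.strip l == header,
           (w || (pvTgt header curH && pvHit pfx curB)) || pvTgt header curH,
           r || (pvTgt header curH && pvHit pfx curB))
          = (((acc ++ pvHdrOut curH ++ pvBodyOut pfx el (pvTgt header curH) curB
                ++ (if pvTgt header curH && !(w || pvHit pfx curB) then [el] else []))
               ++ pvHdrOut (some l) ++ pvBodyOut pfx el (pvTgt header (some l)) []),
             pvTgt header (some l),
             (w || pvTgt header curH) || (pvTgt header (some l) && pvHit pfx []),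
             (r || (pvTgt header curH && pvHit pfx curB)) || (pvTgt header (some l) && pvHit pfx [])) := by
        rw [e1, e2]
        have hb0 : pvBodyOut pfx el (pvTgt header (some l)) ([] : List String) = [] := by
          simp [pvBodyOut]
        rw [hb0]
        simp [pvTgt, pvHdrOut, pvHit]
      rw [pvStepA_header header pfx el l _ _ _ _ hl, hstate]
    · -- l is an ordinary line
      rw [show pvBuildGroups (l :: rest) curH curB
            = pvBuildGroups rest curH (curB ++ [l]) by
          simp [pvBuildGroups, hl]]
      rw [ih curH (curB ++ [l]) acc w r]
      have hstep : pvStepA header pfx el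
            (acc ++ pvHdrOut curH ++ pvBodyOut pfx el (pvTgt header curH) curB,
             pvTgt header curH,
             w || (pvTgt header curH && pvHit pfx curB),
             r || (pvTgt header curH && pvHit pfx curB)) l
          = (acc ++ pvHdrOut curH ++ pvBodyOut pfx el (pvTgt header curH) (curB ++ [l]),
             pvTgt header curH,
             w || (pvTgt header curH && pvHit pfx (curB ++ [l])),
             r || (pvTgt header curH && pvHit pfx (curB ++ [l]))) := by
        by_cases hm : PySem.Chars.startswith (PySem.Chars.strip l.toList) pfx.toList = true
        · cases hT : pvTgt header curH <;>
            simp [pvStepA, hl, hm, pvBodyOut, pvHit, List.append_assoc]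
        · cases hT : pvTgt header curH <;>
            simp [pvStepA, hl, hm, pvBodyOut, pvHit, List.append_assoc]
      rw [hstep]

-- ===== VERDICT (by name: the statement is the Claim_ definition above) =====
theorem upsert_backup_entry_py_spec : Claim_equal_upsert_backup_entry_py := by
  intro content group_name entry_name entry_line _
  unfold Spec_upsert_backup_entry_py upsert_backup_entry_py upsert_backup_entry_py_alt
  rw [pvMain ("[" ++ group_name ++ "]") (entry_name ++ " =") entry_line
        (PySem.Str.splitlines content) none [] [] false false]
  rcases h : List.foldl (pvStepA ("[" ++ group_name ++ "]") (entry_name ++ " =") entry_line)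
      ([], false, false, false) (PySem.Str.splitlines content) with ⟨nl, inT, ew, rp⟩
  rw [show ((([] : List String) ++ pvHdrOut none
        ++ pvBodyOut (entry_name ++ " =") entry_line (pvTgt ("[" ++ group_name ++ "]") none) [],
        pvTgt ("[" ++ group_name ++ "]") none,
        false || (pvTgt ("[" ++ group_name ++ "]") none && pvHit (entry_name ++ " =") []),
        false || (pvTgt ("[" ++ group_name ++ "]") none && pvHit (entry_name ++ " =") []))
      : List String × Bool × Bool × Bool)
      = (([] : List String), false, false, false) from rfl]
  rw [h]
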